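-- pv_equiv track=rewrite | github.com/getkiagent/kiagent | scripts/fix_signature.py | _build_raw
-- ===== SOURCE A (Python) =====
-- def _build_raw(msg, new_body):
--     """Build raw email string from message headers + new body."""
--     headers = msg["payload"].get("headers", [])
--     lines = []
--     for h in headers:
--         name = h["name"]
--         if name.lower() in ("to", "subject", "from", "content-type", "mime-version"):
--             lines.append(f"{name}: {h['value']}")
--     if not any(h["name"].lower() == "content-type" for h in headers):
--         lines.append("Content-Type: text/plain; charset=utf-8")
--     if not any(h["name"].lower() == "mime-version" for h in headers):
--         lines.append("MIME-Version: 1.0")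
--     lines.append("")
--     lines.append(new_body)
--     return "\r\n".join(lines)
-- ===== SOURCE B (Python) =====
-- def _build_raw(msg, new_body):
--     """Build raw email string from message headers + new body.
--
--     Recursive back-to-front construction: one recursion over the header list
--     returns the presence flags together with the already-joined header text,
--     so there is no lines list and no join at all.
--     """
--     def go(headers):
--         if not headers:
--             return (False, False, "")
--         h, rest = headers[0], headers[1:]
--         ct, mv, tail = go(rest)
--         name = h["name"]
--         low = name.lower()
--         if low in ("to", "subject", "from", "content-type", "mime-version"):
--             text = name + ": " + h["value"] + "\r\n" + tail
--         else:
--             text = tail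
--         return (ct or low == "content-type", mv or low == "mime-version", text)
--
--     ct, mv, text = go(msg["payload"].get("headers", []))
--     if not ct:
--         text += "Content-Type: text/plain; charset=utf-8\r\n"
--     if not mv:
--         text += "MIME-Version: 1.0\r\n"
--     return text + "\r\n" + new_body
-- ===== Notes on version B (the rewrite author's own statement) =====
-- stated objective: alternative
-- what changed: Replaces A's lines-list build loop, two any() rescans and final '\r\n'.join with a single back-to-front recursion over the headers that returns the presence flags together with the already-joined header text, concatenating strings directly.
import Mathlib
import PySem

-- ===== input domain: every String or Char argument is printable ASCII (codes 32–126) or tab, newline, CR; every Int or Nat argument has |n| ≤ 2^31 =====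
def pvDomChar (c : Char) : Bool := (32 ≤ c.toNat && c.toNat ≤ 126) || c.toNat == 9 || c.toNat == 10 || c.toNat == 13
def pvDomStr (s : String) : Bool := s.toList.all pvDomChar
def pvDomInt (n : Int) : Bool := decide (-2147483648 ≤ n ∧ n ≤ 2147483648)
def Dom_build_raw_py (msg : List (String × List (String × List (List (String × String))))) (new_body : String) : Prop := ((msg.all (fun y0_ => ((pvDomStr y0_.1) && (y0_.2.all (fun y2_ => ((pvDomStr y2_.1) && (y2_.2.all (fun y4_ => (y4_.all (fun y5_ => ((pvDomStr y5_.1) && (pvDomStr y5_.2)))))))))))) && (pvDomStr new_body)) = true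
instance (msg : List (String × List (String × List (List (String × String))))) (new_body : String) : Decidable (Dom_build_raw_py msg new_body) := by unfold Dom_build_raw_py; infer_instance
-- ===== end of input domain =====

-- B rebuilds the raw string by one back-to-front recursion over the headers (flags + joined text
-- returned together), replacing A's lines list, two any() rescans and final join; return value only.

-- the target header names, shared by both ports
def pvTargets : List String := ["to", "subject", "from", "content-type", "mime-version"]

-- ===== PORT A =====
def build_raw_py (msg : List (String × List (String × List (List (String × String))))) (new_body : String) : String :=
  let headers := (PySem.Dict.mk (((PySem.Dict.mk msg).get? "payload").getD [])).getD "headers" []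
  let lines := headers.foldl (fun (acc : List String) h =>
      let name := ((PySem.Dict.mk h).get? "name").getD ""
      if PySem.Str.lower name ∈ pvTargets then
        acc ++ [name ++ ": " ++ ((PySem.Dict.mk h).get? "value").getD ""]
      else acc) []
  let lines := if !(headers.any (fun h => PySem.Str.lower (((PySem.Dict.mk h).get? "name").getD "") == "content-type"))
    then lines ++ ["Content-Type: text/plain; charset=utf-8"] else lines
  let lines := if !(headers.any (fun h => PySem.Str.lower (((PySem.Dict.mk h).get? "name").getD "") == "mime-version"))
    then lines ++ ["MIME-Version: 1.0"] else lines
  PySem.Str.join "\r\n" (lines ++ [""] ++ [new_body])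

-- ===== PORT B =====
-- the inner recursive helper go(headers): flags + already-joined header text, built back to front
def pvGo (headers : List (List (String × String))) : Bool × Bool × String :=
  match headers with
  | [] => (false, false, "")
  | h :: rest =>
    let r := pvGo rest
    let name := ((PySem.Dict.mk h).get? "name").getD ""
    let low := PySem.Str.lower name
    let text := if low ∈ pvTargets then
        name ++ ": " ++ ((PySem.Dict.mk h).get? "value").getD "" ++ "\r\n" ++ r.2.2
      else r.2.2
    (r.1 || (low == "content-type"), r.2.1 || (low == "mime-version"), text)

def build_raw_py_alt (msg : List (String × List (String × List (List (String × String))))) (new_body : String) : String :=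
  let r := pvGo ((PySem.Dict.mk (((PySem.Dict.mk msg).get? "payload").getD [])).getD "headers" [])
  let text := if r.1 then r.2.2 else r.2.2 ++ "Content-Type: text/plain; charset=utf-8\r\n"
  let text := if r.2.1 then text else text ++ "MIME-Version: 1.0\r\n"
  text ++ "\r\n" ++ new_body

-- ===== PRECONDITION & SPEC =====
-- Pre_ excludes exactly the inputs where A raises KeyError: missing "payload" key, a header without
-- "name", or a header with a targeted name but no "value".
def Pre_build_raw_py (msg : List (String × List (String × List (List (String × String))))) (new_body : String) : Prop :=
  (PySem.Dict.mk msg).contains "payload" = true ∧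
  ∀ h ∈ (PySem.Dict.mk (((PySem.Dict.mk msg).get? "payload").getD [])).getD "headers" [],
    (PySem.Dict.mk h).contains "name" = true ∧
    (PySem.Str.lower (((PySem.Dict.mk h).get? "name").getD "") ∈ pvTargets → (PySem.Dict.mk h).contains "value" = true)
instance (msg : List (String × List (String × List (List (String × String))))) (new_body : String) : Decidable (Pre_build_raw_py msg new_body) := by unfold Pre_build_raw_py; infer_instance

def pvWitness_build_raw_py : (List (String × List (String × List (List (String × String))))) × String :=
  ([("payload", [("headers", [[("name", "To"), ("value", "a@b")], [("name", "X-Q"), ("value", "z")]])])], "hello")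

def Spec_build_raw_py (msg : List (String × List (String × List (List (String × String))))) (new_body : String) (out : String) : Prop := out = build_raw_py_alt msg new_body
instance (msg : List (String × List (String × List (List (String × String))))) (new_body : String) (out : String) : Decidable (Spec_build_raw_py msg new_body out) := by unfold Spec_build_raw_py; infer_instance

-- ===== CLAIM (what is proved, stated in full; the proofs are below) =====
def Claim_equal_build_raw_py : Prop := ∀ (msg : List (String × List (String × List (List (String × String))))) (new_body : String), Dom_build_raw_py msg new_body → Pre_build_raw_py msg new_body → Spec_build_raw_py msg new_body (build_raw_py msg new_body)

-- ===== LEMMAS AND PROOFS =====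

-- abbreviation used only in the proofs: the per-header line A appends (without terminator)
def pvLine (h : List (String × String)) : String :=
  ((PySem.Dict.mk h).get? "name").getD "" ++ ": " ++ ((PySem.Dict.mk h).get? "value").getD ""

def pvP (h : List (String × String)) : Bool :=
  decide (PySem.Str.lower (((PySem.Dict.mk h).get? "name").getD "") ∈ pvTargets)

-- List-level: intercalate over a nonempty list, as head ++ (sep ++ ·) of the tail
theorem pvInter (sep a : List Char) (t : List (List Char)) :
    sep.intercalate (a :: t) = a ++ t.flatMap (fun x => sep ++ x) := by
  induction t generalizing a with
  | nil => simp [List.intercalate, List.intersperse]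
  | cons b t' ih =>
    have h := ih b
    simp only [List.intercalate, List.intersperse_cons₂, List.flatten_cons] at h ⊢
    simp [h, List.append_assoc]

-- join over a list with at least two elements peels off the first separator
theorem pvJoinCons (a b : String) (t : List String) :
    PySem.Str.join "\r\n" (a :: b :: t) = a ++ "\r\n" ++ PySem.Str.join "\r\n" (b :: t) := by
  simp only [PySem.Str.join, PySem.Chars.join, List.map_cons]
  rw [pvInter, pvInter, List.flatMap_cons]
  rw [show ("\r\n".toList = ['\x0d', '\n']) from rfl]
  simp only [← List.append_assoc, String.ofList_append]
  rw [show (String.ofList ['\x0d', '\n'] = "\r\n") from rfl]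
  simp [String.append_assoc]

-- "\r\n".join(L ++ ["", nb]) = foldr (l ++ "\r\n" ++ ·) ("\r\n" ++ nb) L
theorem pvJoinEq (L : List String) (nb : String) :
    PySem.Str.join "\r\n" (L ++ ["", nb]) =
      L.foldr (fun l acc => l ++ "\r\n" ++ acc) ("\r\n" ++ nb) := by
  induction L with
  | nil =>
    rw [List.nil_append, pvJoinCons, List.foldr_nil]
    simp [PySem.Str.join, PySem.Chars.join, List.intercalate]
  | cons a t ih =>
    rcases he : t ++ ["", nb] with _ | ⟨b, rest⟩
    · cases t <;> simp at he
    · calc PySem.Str.join "\r\n" ((a :: t) ++ ["", nb])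
          = PySem.Str.join "\r\n" (a :: b :: rest) := by rw [List.cons_append, he]
        _ = a ++ "\r\n" ++ PySem.Str.join "\r\n" (b :: rest) := pvJoinCons a b rest
        _ = a ++ "\r\n" ++ (t.foldr (fun l acc => l ++ "\r\n" ++ acc) ("\r\n" ++ nb)) := by
            rw [← he, ih]
        _ = (a :: t).foldr (fun l acc => l ++ "\r\n" ++ acc) ("\r\n" ++ nb) := by
            rw [List.foldr_cons]

-- the recursion computes the two any() flags and the foldr-joined text of the kept lines
theorem pvGoEq (hs : List (List (String × String))) :
    pvGo hs = (hs.any (fun h => PySem.Str.lower (((PySem.Dict.mk h).get? "name").getD "") == "content-type"),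
               hs.any (fun h => PySem.Str.lower (((PySem.Dict.mk h).get? "name").getD "") == "mime-version"),
               hs.foldr (fun h acc => if pvP h then pvLine h ++ "\r\n" ++ acc else acc) "") := by
  induction hs with
  | nil => simp [pvGo]
  | cons h t ih =>
    simp only [pvGo, ih, List.any_cons, List.foldr_cons]
    refine Prod.ext ?_ (Prod.ext ?_ ?_) <;> simp [pvP, pvLine, Bool.or_comm, String.append_assoc]

-- appending after a kept-lines foldr pushes into the base
theorem pvFoldrAppend (hs : List (List (String × String))) (x t : String) :
    hs.foldr (fun h acc => if pvP h then pvLine h ++ "\r\n" ++ acc else acc) x ++ t =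
    hs.foldr (fun h acc => if pvP h then pvLine h ++ "\r\n" ++ acc else acc) (x ++ t) := by
  induction hs with
  | nil => rfl
  | cons h hs ih =>
    simp only [List.foldr_cons]
    by_cases hp : pvP h = true
    · rw [if_pos hp, if_pos hp, String.append_assoc, String.append_assoc, ih]
      exact String.append_assoc.symm
    · rw [if_neg hp, if_neg hp, ih]

-- A's line-building foldl is filter-then-map
theorem pvLinesEq (hs : List (List (String × String))) (acc : List String) :
    hs.foldl (fun (acc : List String) h =>
      let name := ((PySem.Dict.mk h).get? "name").getD ""
      if PySem.Str.lower name ∈ pvTargets then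
        acc ++ [name ++ ": " ++ ((PySem.Dict.mk h).get? "value").getD ""]
      else acc) acc = acc ++ (hs.filter (fun h => pvP h)).map pvLine := by
  induction hs generalizing acc with
  | nil => simp
  | cons h t ih =>
    by_cases hp : PySem.Str.lower (((PySem.Dict.mk h).get? "name").getD "") ∈ pvTargets <;>
      simp [pvP, pvLine, hp, ih]

-- foldr over the filtered-and-mapped lines as a foldr over the headers
theorem pvFoldrFilterMap (hs : List (List (String × String))) (base : String) :
    ((hs.filter (fun h => pvP h)).map pvLine).foldr (fun l acc => l ++ "\r\n" ++ acc) base =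
    hs.foldr (fun h acc => if pvP h then pvLine h ++ "\r\n" ++ acc else acc) base := by
  induction hs with
  | nil => rfl
  | cons h t ih => by_cases hp : pvP h = true <;> simp [hp, ih]

-- the whole pipeline, for an arbitrary header list
theorem pvMain (hs : List (List (String × String))) (nb : String) :
    (let lines := hs.foldl (fun (acc : List String) h =>
        let name := ((PySem.Dict.mk h).get? "name").getD ""
        if PySem.Str.lower name ∈ pvTargets then
          acc ++ [name ++ ": " ++ ((PySem.Dict.mk h).get? "value").getD ""]
        else acc) [];
     let lines := if !(hs.any (fun h => PySem.Str.lower (((PySem.Dict.mk h).get? "name").getD "") == "content-type"))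
       then lines ++ ["Content-Type: text/plain; charset=utf-8"] else lines;
     let lines := if !(hs.any (fun h => PySem.Str.lower (((PySem.Dict.mk h).get? "name").getD "") == "mime-version"))
       then lines ++ ["MIME-Version: 1.0"] else lines;
     PySem.Str.join "\r\n" (lines ++ [""] ++ [nb]))
    = (let r := pvGo hs;
       let text := if r.1 then r.2.2 else r.2.2 ++ "Content-Type: text/plain; charset=utf-8\r\n";
       let text := if r.2.1 then text else text ++ "MIME-Version: 1.0\r\n";
       text ++ "\r\n" ++ nb) := by
  rw [pvGoEq]
  dsimp only
  rw [pvLinesEq, List.nil_append]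
  by_cases hct : hs.any (fun h => PySem.Str.lower (((PySem.Dict.mk h).get? "name").getD "") == "content-type") = true <;>
    by_cases hmv : hs.any (fun h => PySem.Str.lower (((PySem.Dict.mk h).get? "name").getD "") == "mime-version") = true <;>
    simp only [hct, hmv, Bool.not_true, Bool.not_false, if_true, if_false, Bool.false_eq_true]
  · -- both present
    rw [show (List.map pvLine (List.filter (fun h => pvP h) hs)) ++ [""] ++ [nb]
          = (List.map pvLine (List.filter (fun h => pvP h) hs)) ++ ["", nb] from by simp,
        pvJoinEq, pvFoldrFilterMap, pvFoldrAppend, pvFoldrAppend]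
    congr 1
  · -- content-type present, mime-version missing
    rw [show (List.map pvLine (List.filter (fun h => pvP h) hs) ++ ["MIME-Version: 1.0"]) ++ [""] ++ [nb]
          = (List.map pvLine (List.filter (fun h => pvP h) hs) ++ ["MIME-Version: 1.0"]) ++ ["", nb] from by simp,
        pvJoinEq, List.foldr_append, pvFoldrFilterMap, pvFoldrAppend, pvFoldrAppend, pvFoldrAppend]
    congr 1
  · -- content-type missing, mime-version present
    rw [show (List.map pvLine (List.filter (fun h => pvP h) hs) ++ ["Content-Type: text/plain; charset=utf-8"]) ++ [""] ++ [nb]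
          = (List.map pvLine (List.filter (fun h => pvP h) hs) ++ ["Content-Type: text/plain; charset=utf-8"]) ++ ["", nb] from by simp,
        pvJoinEq, List.foldr_append, pvFoldrFilterMap, pvFoldrAppend, pvFoldrAppend, pvFoldrAppend]
    congr 1
  · -- both missing
    rw [show ((List.map pvLine (List.filter (fun h => pvP h) hs) ++ ["Content-Type: text/plain; charset=utf-8"]) ++ ["MIME-Version: 1.0"]) ++ [""] ++ [nb]
          = (List.map pvLine (List.filter (fun h => pvP h) hs) ++ ["Content-Type: text/plain; charset=utf-8", "MIME-Version: 1.0"]) ++ ["", nb] from by simp,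
        pvJoinEq, List.foldr_append, pvFoldrFilterMap, pvFoldrAppend, pvFoldrAppend, pvFoldrAppend, pvFoldrAppend]
    congr 1

theorem build_raw_py_spec : Claim_equal_build_raw_py := by
  intro msg new_body _ _
  unfold Spec_build_raw_py build_raw_py build_raw_py_alt
  exact pvMain _ new_body
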